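-- pv_equiv track=rewrite | github.com/Bushra-Khan49/MADS-box-Evolutionary-gene-detection | Uploads/scripts/extract_domains_native.py | extract_aligned_domain
-- ===== SOURCE A (Python) =====
-- def extract_aligned_domain(aligned_seq, start, end):
--     # start, end are 1-based indices in the original (ungapped) sequence
--     # returns the substring of aligned_seq that corresponds to these positions
--     current_pos = 0
--     msa_start = -1
--     msa_end = -1
--     for i, char in enumerate(aligned_seq):
--         if char != '-':
--             current_pos += 1
--         if current_pos == start and msa_start == -1:
--             msa_start = i
--         if current_pos == end:
--             msa_end = i
--             break
--     if msa_start != -1 and msa_end != -1: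
--         return aligned_seq[msa_start:msa_end+1]
--     return None
-- ===== SOURCE B (Python) =====
-- def extract_aligned_domain(aligned_seq, start, end):
--     # Build, in one pass, the first aligned index at which each running
--     # ungapped-position value appears, then answer by table lookup.
--     firstidx = {}
--     cp = 0
--     for i, ch in enumerate(aligned_seq):
--         if ch != '-':
--             cp += 1
--         if cp not in firstidx:
--             firstidx[cp] = i
--     if start in firstidx and end in firstidx and firstidx[start] <= firstidx[end]:
--         return aligned_seq[firstidx[start]:firstidx[end] + 1]
--     return None
-- ===== Notes on version B (the rewrite author's own statement) =====
-- stated objective: alternative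
-- what changed: Replaces A's inline detection with early break and -1 sentinels by a one-pass first-occurrence index table (dict from ungapped position to first aligned index) followed by membership lookups of start and end.
import Mathlib
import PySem

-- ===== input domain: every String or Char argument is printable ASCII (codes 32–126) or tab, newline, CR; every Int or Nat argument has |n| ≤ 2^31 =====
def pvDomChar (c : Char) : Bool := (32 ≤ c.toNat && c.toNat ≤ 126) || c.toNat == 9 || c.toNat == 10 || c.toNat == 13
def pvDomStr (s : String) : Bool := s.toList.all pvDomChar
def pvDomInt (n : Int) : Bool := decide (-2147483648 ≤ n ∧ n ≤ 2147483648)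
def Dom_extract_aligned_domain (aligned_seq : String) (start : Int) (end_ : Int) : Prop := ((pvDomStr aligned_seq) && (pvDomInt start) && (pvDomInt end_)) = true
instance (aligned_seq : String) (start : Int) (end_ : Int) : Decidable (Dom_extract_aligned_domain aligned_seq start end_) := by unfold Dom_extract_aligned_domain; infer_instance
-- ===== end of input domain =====

-- B replaces A's early-break scan with sentinels by a first-occurrence index table plus lookups (alternative decomposition, same cost).

-- 'if char != '-': current_pos += 1'  (the counter update both versions share)
def pvStep (c : Char) (cp : Int) : Int := if c ≠ '-' then cp + 1 else cp

-- ===== PORT A =====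
-- A's for-loop with break: state (current_pos, i, msa_start); returns (msa_start, msa_end)
def pvLoopA (start end_ : Int) : List Char → Int → Int → Int → Int × Int
  | [], _, _, ms => (ms, -1)
  | c :: rest, cp, i, ms =>
    if pvStep c cp = end_ then (if pvStep c cp = start ∧ ms = -1 then i else ms, i)
    else pvLoopA start end_ rest (pvStep c cp) (i + 1) (if pvStep c cp = start ∧ ms = -1 then i else ms)

def extract_aligned_domain (aligned_seq : String) (start : Int) (end_ : Int) : Option String :=
  if (pvLoopA start end_ aligned_seq.toList 0 0 (-1)).1 ≠ -1 ∧ (pvLoopA start end_ aligned_seq.toList 0 0 (-1)).2 ≠ -1 then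
    some (String.ofList (PySem.List.slice aligned_seq.toList
      (some (pvLoopA start end_ aligned_seq.toList 0 0 (-1)).1)
      (some ((pvLoopA start end_ aligned_seq.toList 0 0 (-1)).2 + 1))))
  else none

-- ===== PORT B =====
-- 'for i, ch in enumerate(...): if ch != '-': cp += 1; if cp not in firstidx: firstidx[cp] = i'
def pvBuildB : List Char → Int → Int → PySem.Dict Int Int → PySem.Dict Int Int
  | [], _, _, d => d
  | c :: rest, cp, i, d =>
    pvBuildB rest (pvStep c cp) (i + 1) (if d.contains (pvStep c cp) then d else d.insert (pvStep c cp) i)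

def extract_aligned_domain_alt (aligned_seq : String) (start : Int) (end_ : Int) : Option String :=
  match (pvBuildB aligned_seq.toList 0 0 PySem.Dict.empty).get? start,
        (pvBuildB aligned_seq.toList 0 0 PySem.Dict.empty).get? end_ with
  | some s, some e =>
    if s ≤ e then some (String.ofList (PySem.List.slice aligned_seq.toList (some s) (some (e + 1)))) else none
  | _, _ => none

-- ===== PRECONDITION & SPEC =====
def Spec_extract_aligned_domain (aligned_seq : String) (start : Int) (end_ : Int) (out : Option String) : Prop := out = extract_aligned_domain_alt aligned_seq start end_
instance (aligned_seq : String) (start : Int) (end_ : Int) (out : Option String) : Decidable (Spec_extract_aligned_domain aligned_seq start end_ out) := by unfold Spec_extract_aligned_domain; infer_instance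

-- ===== CLAIM (what is proved, stated in full; the proofs are below) =====
def Claim_equal_extract_aligned_domain : Prop := ∀ (aligned_seq : String) (start : Int) (end_ : Int), Dom_extract_aligned_domain aligned_seq start end_ → Spec_extract_aligned_domain aligned_seq start end_ (extract_aligned_domain aligned_seq start end_)

-- ===== LEMMAS AND PROOFS =====

-- first index ≥ i at which the running ungapped counter (started at cp) equals v
def pvFidx (v : Int) : List Char → Int → Int → Option Int
  | [], _, _ => none
  | c :: rest, cp, i =>
    if pvStep c cp = v then some i else pvFidx v rest (pvStep c cp) (i + 1)

theorem pvFidx_ge (v : Int) (l : List Char) (cp i s : Int)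
    (h : pvFidx v l cp i = some s) : i ≤ s := by
  induction l generalizing cp i with
  | nil => simp [pvFidx] at h
  | cons c rest ih =>
    simp only [pvFidx] at h
    split at h
    · injection h with h; omega
    · have := ih _ _ h; omega

theorem pvBuildB_get? (v : Int) (l : List Char) (cp i : Int) (d : PySem.Dict Int Int) :
    (pvBuildB l cp i d).get? v = (d.get? v).or (pvFidx v l cp i) := by
  induction l generalizing cp i d with
  | nil => simp [pvBuildB, pvFidx]
  | cons c rest ih =>
    simp only [pvBuildB, pvFidx]
    rw [ih]
    by_cases hv : pvStep c cp = v
    · rw [if_pos hv]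
      by_cases hc : d.contains (pvStep c cp)
      · rw [if_pos hc]
        have hsm : (d.get? v).isSome := by
          rw [← hv]; rw [PySem.Dict.contains_eq_isSome_get?] at hc; exact hc
        obtain ⟨w, hw⟩ := Option.isSome_iff_exists.mp hsm
        simp [hw]
      · rw [if_neg hc]
        have hnone : d.get? v = none := by
          rw [← hv]
          rw [PySem.Dict.contains_eq_isSome_get?] at hc
          simpa using hc
        rw [hnone, hv, PySem.Dict.get?_insert]
        simp
    · rw [if_neg hv]
      by_cases hc : d.contains (pvStep c cp)
      · rw [if_pos hc]
      · rw [if_neg hc, PySem.Dict.get?_insert]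
        rw [if_neg (fun h => hv h.symm)]

-- characterisation of A's loop via pvFidx
theorem pvLoopA_eq (start end_ : Int) (l : List Char) (cp i ms : Int) (hi : 0 ≤ i) :
    pvLoopA start end_ l cp i ms =
      (match pvFidx end_ l cp i with
       | none => (if ms = -1 then (pvFidx start l cp i).getD (-1) else ms, -1)
       | some e => ((if ms = -1 then
            (match pvFidx start l cp i with
             | some s => if s ≤ e then s else -1
             | none => -1) else ms), e)) := by
  induction l generalizing cp i ms with
  | nil =>
    simp only [pvLoopA, pvFidx]
    split <;> simp_all
  | cons c rest ih =>
    simp only [pvLoopA, pvFidx]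
    by_cases he : pvStep c cp = end_
    · rw [if_pos he, if_pos he]
      by_cases hm : ms = -1
      · by_cases hs : pvStep c cp = start
        · rw [if_pos ⟨hs, hm⟩, if_pos hs]
          simp [hm]
        · rw [if_neg (fun h => hs h.1), if_neg hs]
          cases hfs : pvFidx start rest (pvStep c cp) (i + 1) with
          | none => simp [hm]
          | some s =>
            have := pvFidx_ge start rest (pvStep c cp) (i + 1) s hfs
            simp only [hm]
            have : ¬ s ≤ i := by omega
            simp [this]
      · rw [if_neg (fun h => hm h.2)]
        simp [hm]
    · rw [if_neg he, if_neg he]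
      by_cases hs : pvStep c cp = start
      · rw [if_pos hs]
        by_cases hm : ms = -1
        · rw [if_pos ⟨hs, hm⟩, if_pos hm]
          rw [ih (pvStep c cp) (i + 1) i (by omega)]
          cases hfe : pvFidx end_ rest (pvStep c cp) (i + 1) with
          | none =>
            have hi' : ¬ i = -1 := by omega
            simp [hi']
          | some e =>
            have := pvFidx_ge end_ rest (pvStep c cp) (i + 1) e hfe
            have hi' : ¬ i = -1 := by omega
            have hle : i ≤ e := by omega
            simp [hi', hle, hm]
        · rw [if_neg (fun h => hm h.2), if_neg hm]
          rw [ih (pvStep c cp) (i + 1) ms (by omega)]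
          cases pvFidx end_ rest (pvStep c cp) (i + 1) <;> simp [hm]
      · rw [if_neg (fun h => hs h.1), if_neg hs]
        exact ih (pvStep c cp) (i + 1) ms (by omega)

-- ===== VERDICT (by name: the statement is the Claim_ definition above) =====
theorem extract_aligned_domain_spec : Claim_equal_extract_aligned_domain := by
  intro aligned_seq start end_ _
  unfold Spec_extract_aligned_domain extract_aligned_domain extract_aligned_domain_alt
  rw [pvLoopA_eq start end_ aligned_seq.toList 0 0 (-1) (by omega)]
  rw [pvBuildB_get? start, pvBuildB_get? end_]
  simp only [PySem.Dict.get?_empty, Option.none_or]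
  cases hfe : pvFidx end_ aligned_seq.toList 0 0 with
  | none =>
    cases hfs : pvFidx start aligned_seq.toList 0 0 <;> simp
  | some e =>
    have he : 0 ≤ e := pvFidx_ge end_ aligned_seq.toList 0 0 e hfe
    cases hfs : pvFidx start aligned_seq.toList 0 0 with
    | none => simp
    | some s =>
      have hs : 0 ≤ s := pvFidx_ge start aligned_seq.toList 0 0 s hfs
      by_cases hle : s ≤ e
      · have h1 : ¬ s = -1 := by omega
        have h2 : ¬ e = -1 := by omega
        simp [hle, h1, h2]
      · simp [hle]
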